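-- pv_equiv track=rewrite | github.com/OGStudio/mahjong-solitaire | scripts/Game.py | composedPositions
-- ===== SOURCE A (Python) =====
-- def composedPositions(positions):
--     r = []
--     # Buffer.
--     pos = []
--     for item in positions:
--         pos.append(item)
--         # A complete position has been constructed.
--         if (len(pos) == 3):
--             r.append(pos)
--             # Reset buffer.
--             pos = []
--     return r
-- ===== SOURCE B (Python) =====
-- def composedPositions(positions):
--     it = iter(positions)
--     return [list(g) for g in zip(it, it, it)]
-- ===== Notes on version B (the rewrite author's own statement) =====
-- stated objective: idiomatic
-- what changed: Replaced the explicit append-and-reset buffer loop by the stdlib grouper idiom: one shared iterator consumed three at a time by zip, which drops the trailing remainder automatically.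
import Mathlib
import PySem

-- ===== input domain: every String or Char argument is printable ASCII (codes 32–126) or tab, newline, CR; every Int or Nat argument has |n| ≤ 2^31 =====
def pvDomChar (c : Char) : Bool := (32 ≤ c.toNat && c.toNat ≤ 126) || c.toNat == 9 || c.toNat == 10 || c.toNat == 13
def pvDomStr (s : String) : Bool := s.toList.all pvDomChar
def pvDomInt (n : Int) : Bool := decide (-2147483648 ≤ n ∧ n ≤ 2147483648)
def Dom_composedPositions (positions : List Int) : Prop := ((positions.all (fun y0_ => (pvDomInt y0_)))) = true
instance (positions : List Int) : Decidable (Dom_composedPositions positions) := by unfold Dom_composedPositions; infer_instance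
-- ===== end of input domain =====

-- B replaces A's explicit buffer loop by consuming the list three elements at a time (grouper idiom); idiomatic, same cost.


-- ===== PORT A =====
-- literal port of A: fold over the input with state (r, pos); append item to the
-- buffer pos, and when it reaches length 3 move it to r and reset the buffer.
def composedPositionsStep (s : List (List Int) × List Int) (item : Int) : List (List Int) × List Int :=
  let pos := s.2 ++ [item]
  if pos.length = 3 then (s.1 ++ [pos], []) else (s.1, pos)

def composedPositions (positions : List Int) : List (List Int) :=
  (positions.foldl composedPositionsStep ([], [])).1

-- ===== PORT B =====
-- port of B: zip(it,it,it) over one shared iterator = take three elements at a time,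
-- stopping as soon as fewer than three remain.
def composedPositions_alt (positions : List Int) : List (List Int) :=
  match positions with
  | a :: b :: c :: rest => [a, b, c] :: composedPositions_alt rest
  | _ => []

-- ===== PRECONDITION & SPEC =====
def Spec_composedPositions (positions : List Int) (out : List (List Int)) : Prop := out = composedPositions_alt positions
instance (positions : List Int) (out : List (List Int)) : Decidable (Spec_composedPositions positions out) := by unfold Spec_composedPositions; infer_instance

-- ===== CLAIM (what is proved, stated in full; the proofs are below) =====
def Claim_equal_composedPositions : Prop := ∀ (positions : List Int), Dom_composedPositions positions → Spec_composedPositions positions (composedPositions positions)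

-- ===== LEMMAS AND PROOFS =====
theorem composedPositions_fold_eq (xs : List Int) :
    ∀ r : List (List Int), (xs.foldl composedPositionsStep (r, [])).1 = r ++ composedPositions_alt xs := by
  induction xs using composedPositions_alt.induct with
  | case1 a b c rest ih =>
      intro r
      simp [composedPositions_alt, List.foldl, composedPositionsStep, ih]
  | case2 xs h =>
      intro r
      match xs, h with
      | [], _ => simp [composedPositions_alt]
      | [a], _ => simp [composedPositions_alt, composedPositionsStep]
      | [a, b], _ => simp [composedPositions_alt, composedPositionsStep]
      | a :: b :: c :: rest, h => exact absurd rfl (h a b c rest)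

-- ===== VERDICT (by name: the statement is the Claim_ definition above) =====
theorem composedPositions_spec : Claim_equal_composedPositions := by
  intro positions _
  unfold Spec_composedPositions composedPositions
  simpa using composedPositions_fold_eq positions []
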